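-- pv_equiv track=rewrite | github.com/optionalg/cracking_the_coding_interview_python-1 | ch5/5.4.py | lower_bin_same_ones
-- ===== SOURCE A (Python) =====
-- def lower_bin_same_ones(num):
--     count_zeros = 0
--     count_ones = 0
--     current_bit = num & 1
--
--     while count_zeros == 0 or current_bit == 0:
--         if current_bit == 1:
--             count_ones += 1
--         else:
--             count_zeros += 1
--
--         current_bit = (num >> count_ones + count_zeros) & 1
--
--     pos = count_ones + count_zeros
--     flipped_num = (1 << pos) ^ num
--     cleared_num = flipped_num & (~0 << pos)
--     ones_mask = (1 << (count_ones + 1) ) - 1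
--     ones_mask_shifted = (ones_mask << (pos - (count_ones + 1)))
--     return cleared_num  | ones_mask_shifted
-- ===== SOURCE B (Python) =====
-- def lower_bin_same_ones(num):
--     # Loop-free bit trick: the next HIGHER number with the same popcount of ~num
--     # (arithmetic snoob: isolate lowest set bit, ripple-add, redistribute the
--     # shifted-out ones), complemented back.  Works on Python's infinite
--     # two's-complement ints, so no loops and no bit counting at all.
--     y = ~num
--     c = y & -y
--     r = y + c
--     return ~(r | (((y ^ r) >> 2) // c))
-- ===== Notes on version B (the rewrite author's own statement) =====
-- stated objective: alternative
-- what changed: A scans bits in a loop counting trailing ones and zeros and rebuilds the result from those counts; B has no loop and no counts at all: it applies the classic arithmetic snoob trick (isolate lowest set bit with y & -y, ripple-add, redistribute the remainder via xor/shift/division) to the complement ~num and complements the result back.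
-- outside the precondition, e.g. on lower_bin_same_ones(-1): A does not finish within the time limit, B raises ZeroDivisionError; on lower_bin_same_ones(1): A does not finish within the time limit, B returns 0; on lower_bin_same_ones(7): A does not finish within the time limit, B returns 0
import Mathlib
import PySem

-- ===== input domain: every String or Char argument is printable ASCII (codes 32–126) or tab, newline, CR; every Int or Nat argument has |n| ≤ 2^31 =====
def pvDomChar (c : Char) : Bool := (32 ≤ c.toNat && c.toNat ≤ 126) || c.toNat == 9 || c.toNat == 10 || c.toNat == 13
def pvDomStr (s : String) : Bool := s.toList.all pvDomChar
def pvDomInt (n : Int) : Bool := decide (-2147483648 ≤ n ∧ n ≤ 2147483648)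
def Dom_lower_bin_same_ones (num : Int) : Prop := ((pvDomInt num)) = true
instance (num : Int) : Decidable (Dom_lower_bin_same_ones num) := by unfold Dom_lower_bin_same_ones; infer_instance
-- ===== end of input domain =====

-- B replaces A's bit-scanning loop by the loop-free arithmetic snoob trick applied to the
-- complement of num; an alternative algorithm of similar cost.

-- ===== PORT A =====
-- A's while loop (which diverges in Python exactly on the inputs excluded by Pre_ below)
-- is ported with a fuel counter; 100 steps are proved sufficient on Dom ∩ Pre_.
def lowerALoop (num : Int) (fuel : Nat) (count_ones count_zeros current_bit : Int) : Int × Int :=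
  match fuel with
  | 0 => (count_ones, count_zeros)
  | f + 1 =>
    if count_zeros = 0 ∨ current_bit = 0 then
      let count_ones' := if current_bit = 1 then count_ones + 1 else count_ones
      let count_zeros' := if current_bit = 1 then count_zeros else count_zeros + 1
      lowerALoop num f count_ones' count_zeros'
        (PySem.Int.band (num >>> (count_ones' + count_zeros').toNat) 1)
    else (count_ones, count_zeros)

def lower_bin_same_ones (num : Int) : Int :=
  let cc := lowerALoop num 100 0 0 (PySem.Int.band num 1)
  let pos := cc.1 + cc.2
  let flipped_num := PySem.Int.bxor ((1:Int) <<< pos.toNat) num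
  let cleared_num := PySem.Int.band flipped_num ((Int.not 0) <<< pos.toNat)
  let ones_mask := ((1:Int) <<< (cc.1 + 1).toNat) - 1
  let ones_mask_shifted := ones_mask <<< (pos - (cc.1 + 1)).toNat
  PySem.Int.bor cleared_num ones_mask_shifted

-- ===== PORT B =====
def lower_bin_same_ones_alt (num : Int) : Int :=
  let y := Int.not num
  let c := PySem.Int.band y (-y)
  let r := y + c
  Int.not (PySem.Int.bor r (PySem.Int.floordiv ((PySem.Int.bxor y r) >>> (2:Nat)) c))

-- ===== PRECONDITION & SPEC =====
-- Pre_ excludes exactly the inputs on which Python A never returns (the while loop runs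
-- forever): -1, and the nonnegative all-ones numbers 2^a - 1 (0, 1, 3, 7, …); every such
-- number inside Dom has a < 64, so within Dom nothing else is excluded.
def Pre_lower_bin_same_ones (num : Int) : Prop :=
  num ≠ -1 ∧ ∀ a : Nat, a < 64 → num ≠ 2 ^ a - 1
instance (num : Int) : Decidable (Pre_lower_bin_same_ones num) := by
  unfold Pre_lower_bin_same_ones; infer_instance
def pvWitness_lower_bin_same_ones : Int := 2

def Spec_lower_bin_same_ones (num : Int) (out : Int) : Prop := out = lower_bin_same_ones_alt num
instance (num : Int) (out : Int) : Decidable (Spec_lower_bin_same_ones num out) := by unfold Spec_lower_bin_same_ones; infer_instance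

-- ===== CLAIM (what is proved, stated in full; the proofs are below) =====
def Claim_equal_lower_bin_same_ones : Prop := ∀ (num : Int), Dom_lower_bin_same_ones num → Pre_lower_bin_same_ones num → Spec_lower_bin_same_ones num (lower_bin_same_ones num)

-- ===== LEMMAS AND PROOFS =====

-- Nat layer: bitwise operations on numbers split as high * 2^K + low.
theorem pvTestBit_split (M u K i : Nat) (hu : u < 2 ^ K) :
    (M * 2 ^ K + u).testBit i = if i < K then u.testBit i else M.testBit (i - K) := by
  split_ifs with h
  · have hm : (M * 2 ^ K + u) % 2 ^ K = u := by
      simp [Nat.add_mod, Nat.mul_mod_left, Nat.mod_eq_of_lt hu]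
    have h2 := Nat.testBit_mod_two_pow (M * 2 ^ K + u) K i
    rw [hm] at h2
    simp [h2, h]
  · have hd : (M * 2 ^ K + u) / 2 ^ K = M := by
      rw [Nat.add_comm, Nat.add_mul_div_right _ _ (Nat.two_pow_pos K), Nat.div_eq_of_lt hu,
        Nat.zero_add]
    have h2 := @Nat.testBit_div_two_pow K (M * 2 ^ K + u) (i - K)
    rw [hd] at h2
    rw [h2]
    congr 1
    omega

theorem pvNat_land_split (M N u v K : Nat) (hu : u < 2 ^ K) (hv : v < 2 ^ K) :
    (M * 2 ^ K + u) &&& (N * 2 ^ K + v) = (M &&& N) * 2 ^ K + (u &&& v) := by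
  apply Nat.eq_of_testBit_eq
  intro i
  rw [Nat.testBit_and, pvTestBit_split _ _ _ _ hu, pvTestBit_split _ _ _ _ hv,
    pvTestBit_split _ _ _ _ (Nat.and_lt_two_pow u hv)]
  split_ifs <;> simp [Nat.testBit_and]

theorem pvNat_lor_split (M N u v K : Nat) (hu : u < 2 ^ K) (hv : v < 2 ^ K) :
    (M * 2 ^ K + u) ||| (N * 2 ^ K + v) = (M ||| N) * 2 ^ K + (u ||| v) := by
  apply Nat.eq_of_testBit_eq
  intro i
  rw [Nat.testBit_or, pvTestBit_split _ _ _ _ hu, pvTestBit_split _ _ _ _ hv,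
    pvTestBit_split _ _ _ _ (Nat.or_lt_two_pow hu hv)]
  split_ifs <;> simp [Nat.testBit_or]

theorem pvNat_lxor_split (M N u v K : Nat) (hu : u < 2 ^ K) (hv : v < 2 ^ K) :
    (M * 2 ^ K + u) ^^^ (N * 2 ^ K + v) = (M ^^^ N) * 2 ^ K + (u ^^^ v) := by
  apply Nat.eq_of_testBit_eq
  intro i
  rw [Nat.testBit_xor, pvTestBit_split _ _ _ _ hu, pvTestBit_split _ _ _ _ hv,
    pvTestBit_split _ _ _ _ (Nat.xor_lt_two_pow hu hv)]
  split_ifs <;> simp [Nat.testBit_xor]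

theorem pvNat_and_mask (u K : Nat) (hu : u < 2 ^ K) : u &&& (2 ^ K - 1) = u := by
  rw [Nat.and_two_pow_sub_one_eq_mod, Nat.mod_eq_of_lt hu]

theorem pvNat_or_mask (u K : Nat) (hu : u < 2 ^ K) : u ||| (2 ^ K - 1) = 2 ^ K - 1 := by
  apply Nat.eq_of_testBit_eq
  intro i
  rw [Nat.testBit_or, Nat.testBit_two_pow_sub_one]
  by_cases h : i < K
  · simp [h]
  · have : u < 2 ^ i := lt_of_lt_of_le hu (Nat.pow_le_pow_right (by norm_num) (by omega))
    simp [h, Nat.testBit_eq_false_of_lt this]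

theorem pvMaskToNat (K : Nat) : ((2:Int) ^ K - 1).toNat = 2 ^ K - 1 := by
  have h1 : (1:Nat) ≤ 2 ^ K := Nat.one_le_two_pow
  rw [show ((2:Int) ^ K - 1) = ((2 ^ K - 1 : Nat) : Int) by rw [Nat.cast_sub h1]; push_cast; ring,
    Int.toNat_natCast]

-- Nat layer: mask xor facts used by the B side.
theorem pvNat_mask_xor_mask (a b : Nat) :
    (2 ^ a - 1) ^^^ (2 ^ (a + b) - 1) = (2 ^ b - 1) * 2 ^ a := by
  apply Nat.eq_of_testBit_eq
  intro i
  have ht : ((2 ^ b - 1) * 2 ^ a).testBit i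
      = if i < a then false else (2 ^ b - 1).testBit (i - a) := by
    have h := pvTestBit_split (2 ^ b - 1) 0 a i (Nat.two_pow_pos a)
    simpa using h
  rw [Nat.testBit_xor, Nat.testBit_two_pow_sub_one, Nat.testBit_two_pow_sub_one, ht]
  by_cases h1 : i < a
  · simp [h1, show i < a + b by omega]
  · by_cases h2 : i < a + b
    · simp [h1, h2, Nat.testBit_two_pow_sub_one, show i - a < b by omega]
    · simp [h1, h2, Nat.testBit_two_pow_sub_one, show ¬ i - a < b by omega]

theorem pvNat_low_xor_bit (a b : Nat) :
    ((2 ^ b - 1) * 2 ^ a) ^^^ 2 ^ (a + b) = (2 ^ (b + 1) - 1) * 2 ^ a := by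
  have hpa := Nat.two_pow_pos a
  have h1 : (2 ^ b - 1) * 2 ^ a < 2 ^ (a + b) := by
    have h : (2:Nat) ^ (a + b) = 2 ^ b * 2 ^ a := by rw [← pow_add, Nat.add_comm]
    rw [h]
    exact (Nat.mul_lt_mul_right hpa).mpr (by have := Nat.one_le_two_pow (n := b); omega)
  have h := pvNat_lxor_split 0 1 ((2 ^ b - 1) * 2 ^ a) 0 (a + b) h1 (Nat.two_pow_pos _)
  simp only [Nat.zero_mul, Nat.zero_add, Nat.one_mul, Nat.add_zero] at h
  rw [h]
  have h5 : (2:Nat) ^ (a + b) = 2 ^ b * 2 ^ a := by rw [← pow_add, Nat.add_comm]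
  have h6 : (0:Nat) ^^^ 1 = 1 := by decide
  rw [h6, Nat.xor_zero, Nat.one_mul, h5, Nat.sub_mul, Nat.sub_mul, Nat.one_mul]
  have h8 : 2 ^ a ≤ 2 ^ b * 2 ^ a := Nat.le_mul_of_pos_left _ (Nat.two_pow_pos b)
  have h9 : 2 ^ (b + 1) * 2 ^ a = 2 ^ b * 2 ^ a + 2 ^ b * 2 ^ a := by rw [pow_succ]; ring
  omega

-- Int layer: the bitwise facts the final mask formulas need.
theorem pvBand_low (m u : Int) (K : Nat) (h0 : 0 ≤ u) (hu : u < 2 ^ K) :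
    PySem.Int.band (m * 2 ^ K + u) (-(2 ^ K)) = m * 2 ^ K := by
  have h1 : (1:Nat) ≤ 2 ^ K := Nat.one_le_two_pow
  have hbneg : ¬ (0:Int) ≤ -(2 ^ K) := by simp
  have hmaskInt : (-(-((2:Int) ^ K)) - 1).toNat = 2 ^ K - 1 := by
    rw [neg_neg]; exact pvMaskToNat K
  lift u to Nat using h0 with U
  have hU : U < 2 ^ K := by exact_mod_cast hu
  rcases (by omega : 0 ≤ m ∨ m < 0) with hm | hm
  · lift m to Nat using hm with M
    have ha : ((M:Int) * 2 ^ K + U) = ((M * 2 ^ K + U : Nat) : Int) := by push_cast; ring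
    rw [ha, PySem.Int.band]
    rw [if_pos (by positivity), if_neg hbneg, Int.toNat_natCast, hmaskInt]
    have hand : (M * 2 ^ K + U) &&& (2 ^ K - 1) = U := by
      have := pvNat_land_split M 0 U (2 ^ K - 1) K hU (by omega)
      simpa [pvNat_and_mask U K hU] using this
    rw [hand, Nat.add_sub_cancel]
    push_cast
    ring
  · set M' : Nat := (-m - 1).toNat with hM'
    have hm' : m = -((M' : Int) + 1) := by simp [hM']; omega
    have haneg : ¬ (0:Int) ≤ m * 2 ^ K + U := by
      push Not
      have h2 : ((M':Int) + 1) * 2 ^ K ≥ 2 ^ K := by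
        have : (1:Int) ≤ (M':Int) + 1 := by omega
        nlinarith [pow_pos (by norm_num : (0:Int) < 2) K]
      rw [hm']
      nlinarith
    rw [PySem.Int.band, if_neg haneg, if_neg hbneg, hmaskInt]
    have key : -(m * 2 ^ K + (U:Int)) - 1 = ((M' * 2 ^ K + (2 ^ K - (1 + U)) : Nat) : Int) := by
      rw [Nat.cast_add, Nat.cast_sub (by omega : 1 + U ≤ 2 ^ K), hm']
      push_cast
      ring
    rw [key, Int.toNat_natCast]
    have hor : (M' * 2 ^ K + (2 ^ K - (1 + U))) ||| (2 ^ K - 1) = M' * 2 ^ K + (2 ^ K - 1) := by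
      have := pvNat_lor_split M' 0 (2 ^ K - (1 + U)) (2 ^ K - 1) K (by omega) (by omega)
      simpa [pvNat_or_mask (2 ^ K - (1 + U)) K (by omega)] using this
    rw [hor, Nat.cast_add, Nat.cast_sub h1, hm']
    push_cast
    ring

theorem pvBxor_bit (m r : Int) (K : Nat) (h0 : 0 ≤ r) (hr : r < 2 ^ K) :
    PySem.Int.bxor (2 ^ K) (m * 2 ^ (K + 1) + 2 ^ K + r) = m * 2 ^ (K + 1) + r := by
  have h1 : (1:Nat) ≤ 2 ^ K := Nat.one_le_two_pow
  lift r to Nat using h0 with R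
  have hR : R < 2 ^ K := by exact_mod_cast hr
  have hapos : (0:Int) ≤ 2 ^ K := by positivity
  have hatoNat : ((2:Int) ^ K).toNat = 2 ^ K := by
    rw [show ((2:Int) ^ K) = ((2 ^ K : Nat) : Int) by push_cast; ring, Int.toNat_natCast]
  rcases (by omega : 0 ≤ m ∨ m < 0) with hm | hm
  · lift m to Nat using hm with M
    have hb : ((M:Int) * 2 ^ (K + 1) + 2 ^ K + R) = (((2 * M + 1) * 2 ^ K + R : Nat) : Int) := by
      push_cast; ring
    rw [hb, PySem.Int.bxor, if_pos hapos, if_pos (by positivity), hatoNat, Int.toNat_natCast]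
    have hxor : 2 ^ K ^^^ ((2 * M + 1) * 2 ^ K + R) = 2 * M * 2 ^ K + R := by
      have hxx : 1 ^^^ (2 * M + 1) = 2 * M := by
        have := pvNat_lxor_split 0 M 1 1 1 (by norm_num) (by norm_num)
        simpa [Nat.mul_comm, Nat.xor_comm] using this
      have := pvNat_lxor_split 1 (2 * M + 1) 0 R K (by omega) hR
      simpa [hxx] using this
    rw [hxor]
    push_cast
    ring
  · set M' : Nat := (-m - 1).toNat with hM'
    have hm' : m = -((M' : Int) + 1) := by simp [hM']; omega
    have hbneg : ¬ (0:Int) ≤ m * 2 ^ (K + 1) + 2 ^ K + R := by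
      push Not
      have h2 : ((M':Int) + 1) * 2 ^ (K + 1) ≥ 2 ^ (K + 1) := by
        have h3 : (1:Int) ≤ (M':Int) + 1 := by omega
        nlinarith [pow_pos (by norm_num : (0:Int) < 2) (K + 1)]
      have h4 : (2:Int) ^ (K + 1) = 2 ^ K * 2 := by rw [pow_succ]
      rw [hm']
      nlinarith
    rw [PySem.Int.bxor, if_pos hapos, if_neg hbneg, hatoNat]
    have key : -(m * 2 ^ (K + 1) + 2 ^ K + (R:Int)) - 1
        = ((2 * M' * 2 ^ K + (2 ^ K - (1 + R)) : Nat) : Int) := by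
      rw [Nat.cast_add, Nat.cast_sub (by omega : 1 + R ≤ 2 ^ K), hm']
      push_cast
      ring
    rw [key, Int.toNat_natCast]
    have hxor : 2 ^ K ^^^ (2 * M' * 2 ^ K + (2 ^ K - (1 + R)))
        = (2 * M' + 1) * 2 ^ K + (2 ^ K - (1 + R)) := by
      have hxx : 1 ^^^ 2 * M' = 2 * M' + 1 := by
        have := pvNat_lxor_split 0 M' 1 0 1 (by norm_num) (by norm_num)
        simpa [Nat.mul_comm, Nat.xor_comm] using this
      have := pvNat_lxor_split 1 (2 * M') 0 (2 ^ K - (1 + R)) K (by omega) (by omega)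
      simpa [hxx] using this
    rw [hxor, Nat.cast_add, Nat.cast_sub (by omega : 1 + R ≤ 2 ^ K), hm']
    push_cast
    ring

theorem pvBor_disjoint (m s : Int) (K : Nat) (h0 : 0 ≤ s) (hs : s < 2 ^ K) :
    PySem.Int.bor (m * 2 ^ K) s = m * 2 ^ K + s := by
  have h1 : (1:Nat) ≤ 2 ^ K := Nat.one_le_two_pow
  lift s to Nat using h0 with S
  have hS : S < 2 ^ K := by exact_mod_cast hs
  rcases (by omega : 0 ≤ m ∨ m < 0) with hm | hm
  · lift m to Nat using hm with M
    have ha : ((M:Int) * 2 ^ K) = ((M * 2 ^ K + 0 : Nat) : Int) := by push_cast; ring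
    rw [ha, PySem.Int.bor, if_pos (by positivity), if_pos (by positivity),
      Int.toNat_natCast, Int.toNat_natCast]
    have hor : (M * 2 ^ K + 0) ||| S = M * 2 ^ K + S := by
      have := pvNat_lor_split M 0 0 S K (by omega) hS
      simpa using this
    rw [hor]
    push_cast
    ring
  · set M' : Nat := (-m - 1).toNat with hM'
    have hm' : m = -((M' : Int) + 1) := by simp [hM']; omega
    have haneg : ¬ (0:Int) ≤ m * 2 ^ K := by
      push Not
      have h3 : (1:Int) ≤ (M':Int) + 1 := by omega
      rw [hm']
      nlinarith [pow_pos (by norm_num : (0:Int) < 2) K]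
    rw [PySem.Int.bor, if_neg haneg, if_pos (by positivity), Int.toNat_natCast]
    have key : -(m * 2 ^ K) - 1 = ((M' * 2 ^ K + (2 ^ K - 1) : Nat) : Int) := by
      rw [Nat.cast_add, Nat.cast_sub h1, hm']
      push_cast
      ring
    rw [key, Int.toNat_natCast]
    have hand : (M' * 2 ^ K + (2 ^ K - 1)) &&& S = S := by
      have := pvNat_land_split M' 0 (2 ^ K - 1) S K (by omega) hS
      have hmask : (2 ^ K - 1) &&& S = S := by
        rw [Nat.and_comm]; exact pvNat_and_mask S K hS
      simpa [hmask] using this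
    rw [hand, Nat.cast_sub (by omega : S ≤ M' * 2 ^ K + (2 ^ K - 1)), Nat.cast_add,
      Nat.cast_sub h1, hm']
    push_cast
    ring

-- Int layer, B side: Int.not arithmetic, lowest set bit, xor of the two loop-free values.
theorem pvNotEq (x : Int) : Int.not x = -x - 1 := by
  cases x with
  | ofNat n => show Int.negSucc n = _ ; simp [Int.negSucc_eq]; ring
  | negSucc n => show Int.ofNat n = _ ; simp [Int.negSucc_eq]

theorem pvLowBit (z : Int) (k : Nat) (hz : z % 2 = 1) :
    PySem.Int.band (z * 2 ^ k) (-(z * 2 ^ k)) = 2 ^ k := by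
  have hknat : ((2:Int) ^ k) = (((2 ^ k : Nat)) : Int) := by push_cast; ring
  have h1 : (1:Nat) ≤ 2 ^ k := Nat.one_le_two_pow
  -- the Nat computation both sign cases reduce to
  have hnat : ∀ n : Nat, ((2 * n + 1) * 2 ^ k) &&& (2 * n * 2 ^ k + (2 ^ k - 1)) = 2 * n * 2 ^ k := by
    intro n
    have hodd_even : (2 * n + 1) &&& (2 * n) = 2 * n := by
      have := pvNat_land_split n n 1 0 1 (by norm_num) (by norm_num)
      simpa [Nat.mul_comm] using this
    have := pvNat_land_split (2 * n + 1) (2 * n) 0 (2 ^ k - 1) k (by omega) (by omega)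
    simpa [hodd_even] using this
  rcases (by omega : 1 ≤ z ∨ z ≤ -1) with hzp | hzn
  · obtain ⟨n, hn⟩ : ∃ n : Nat, z = 2 * n + 1 := ⟨(z - 1).toNat / 2, by omega⟩
    have hapos : (0:Int) ≤ z * 2 ^ k := by positivity
    have hbneg : ¬ (0:Int) ≤ -(z * 2 ^ k) := by
      push Not
      nlinarith [pow_pos (by norm_num : (0:Int) < 2) k]
    rw [PySem.Int.band, if_pos hapos, if_neg hbneg]
    have ha : (z * 2 ^ k).toNat = (2 * n + 1) * 2 ^ k := by
      rw [hn]
      rw [show ((2:Int) * n + 1) * 2 ^ k = (((2 * n + 1) * 2 ^ k : Nat) : Int) by push_cast; ring]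
      exact Int.toNat_natCast _
    have hb : (-(-(z * 2 ^ k)) - 1).toNat = 2 * n * 2 ^ k + (2 ^ k - 1) := by
      rw [neg_neg, hn]
      rw [show ((2:Int) * n + 1) * 2 ^ k - 1 = ((2 * n * 2 ^ k + (2 ^ k - 1) : Nat) : Int) by
        rw [Nat.cast_add, Nat.cast_sub h1]; push_cast; ring]
      exact Int.toNat_natCast _
    rw [ha, hb, hnat n]
    rw [show (2 * n + 1) * 2 ^ k = 2 * n * 2 ^ k + 2 ^ k by ring, Nat.add_sub_cancel_left]
    rw [hknat]
  · obtain ⟨n, hn⟩ : ∃ n : Nat, z = -(2 * (n:Int) + 1) := ⟨(-z - 1).toNat / 2, by omega⟩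
    have hbpos : (0:Int) ≤ -(z * 2 ^ k) := by
      have := pow_pos (by norm_num : (0:Int) < 2) k
      nlinarith
    have haneg : ¬ (0:Int) ≤ z * 2 ^ k := by
      push Not
      have := pow_pos (by norm_num : (0:Int) < 2) k
      nlinarith
    rw [PySem.Int.band, if_neg haneg, if_pos hbpos]
    have hb : (-(z * 2 ^ k)).toNat = (2 * n + 1) * 2 ^ k := by
      rw [hn]
      rw [show -(-((2:Int) * n + 1) * 2 ^ k) = (((2 * n + 1) * 2 ^ k : Nat) : Int) by push_cast; ring]
      exact Int.toNat_natCast _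
    have ha : (-(z * 2 ^ k) - 1).toNat = 2 * n * 2 ^ k + (2 ^ k - 1) := by
      rw [hn]
      rw [show -(-((2:Int) * n + 1) * 2 ^ k) - 1 = ((2 * n * 2 ^ k + (2 ^ k - 1) : Nat) : Int) by
        rw [Nat.cast_add, Nat.cast_sub h1]; push_cast; ring]
      exact Int.toNat_natCast _
    rw [hb, ha, hnat n]
    rw [show (2 * n + 1) * 2 ^ k = 2 * n * 2 ^ k + 2 ^ k by ring, Nat.add_sub_cancel_left]
    rw [hknat]

theorem pvBxorYR (M : Int) (a b : Nat) (hb : 1 ≤ b) :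
    PySem.Int.bxor (M * 2 ^ (a + b + 1) + (2 ^ b - 1) * 2 ^ a)
      (M * 2 ^ (a + b + 1) + 2 ^ (a + b)) = 2 ^ (a + b + 1) - 2 ^ a := by
  set K : Nat := a + b + 1 with hK
  have h2ab : (2:Nat) ^ (a + b) < 2 ^ K := Nat.pow_lt_pow_right (by norm_num) (by omega)
  have hLy : ((2:Nat) ^ b - 1) * 2 ^ a < 2 ^ (a + b) := by
    have hpa := Nat.two_pow_pos a
    have h : (2:Nat) ^ (a + b) = 2 ^ b * 2 ^ a := by rw [← pow_add, Nat.add_comm]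
    rw [h]
    exact (Nat.mul_lt_mul_right hpa).mpr (by have := Nat.one_le_two_pow (n := b); omega)
  have hgoalNat : ((2:Nat) ^ b - 1) * 2 ^ a ^^^ 2 ^ (a + b) = 2 ^ K - 2 ^ a := by
    rw [pvNat_low_xor_bit a b]
    have h1 : (2:Nat) ^ (b + 1) * 2 ^ a = 2 ^ K := by rw [← pow_add]; congr 1; omega
    have h2 : (1:Nat) ≤ 2 ^ (b + 1) := Nat.one_le_two_pow
    calc ((2:Nat) ^ (b + 1) - 1) * 2 ^ a = 2 ^ (b + 1) * 2 ^ a - 2 ^ a := by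
          rw [Nat.sub_mul, Nat.one_mul]
      _ = 2 ^ K - 2 ^ a := by rw [h1]
  have hIcast : ((2:Int) ^ K - 2 ^ a) = (((2 ^ K - 2 ^ a : Nat)) : Int) := by
    rw [Nat.cast_sub (Nat.pow_le_pow_right (by norm_num) (by omega))]
    push_cast; ring
  rcases (by omega : 0 ≤ M ∨ M < 0) with hM | hM
  · lift M to Nat using hM with Mn
    have hcy : ((Mn:Int) * 2 ^ K + (2 ^ b - 1) * 2 ^ a)
        = ((Mn * 2 ^ K + (2 ^ b - 1) * 2 ^ a : Nat) : Int) := by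
      rw [Nat.cast_add, Nat.cast_mul, Nat.cast_mul, Nat.cast_sub Nat.one_le_two_pow]
      push_cast; ring
    have hcr : ((Mn:Int) * 2 ^ K + 2 ^ (a + b)) = ((Mn * 2 ^ K + 2 ^ (a + b) : Nat) : Int) := by
      push_cast; ring
    rw [hcy, hcr, PySem.Int.bxor, if_pos (Int.natCast_nonneg _), if_pos (Int.natCast_nonneg _),
      Int.toNat_natCast, Int.toNat_natCast]
    have := pvNat_lxor_split Mn Mn ((2 ^ b - 1) * 2 ^ a) (2 ^ (a + b)) K
      (lt_trans hLy h2ab) h2ab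
    rw [this, Nat.xor_self, Nat.zero_mul, Nat.zero_add, hgoalNat, hIcast]
  · set M' : Nat := (-M - 1).toNat with hM'
    have hm' : M = -((M' : Int) + 1) := by simp [hM']; omega
    have hpK := pow_pos (by norm_num : (0:Int) < 2) K
    have hLyI : ((2:Int) ^ b - 1) * 2 ^ a < 2 ^ K := by
      calc ((2:Int) ^ b - 1) * 2 ^ a = (((2 ^ b - 1) * 2 ^ a : Nat)) := by
            rw [Nat.cast_mul, Nat.cast_sub Nat.one_le_two_pow]; push_cast; ring
        _ < 2 ^ K := by exact_mod_cast lt_trans hLy h2ab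
    have hyneg : ¬ (0:Int) ≤ M * 2 ^ K + (2 ^ b - 1) * 2 ^ a := by
      push Not
      rw [hm']
      have h3 : (1:Int) ≤ (M':Int) + 1 := by omega
      nlinarith
    have h2abI : (2:Int) ^ (a + b) < 2 ^ K := by exact_mod_cast h2ab
    have hrneg : ¬ (0:Int) ≤ M * 2 ^ K + 2 ^ (a + b) := by
      push Not
      rw [hm']
      have h3 : (1:Int) ≤ (M':Int) + 1 := by omega
      have h4 := pow_pos (by norm_num : (0:Int) < 2) (a + b)
      nlinarith
    rw [PySem.Int.bxor, if_neg hyneg, if_neg hrneg]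
    have hky : -(M * 2 ^ K + (2 ^ b - 1) * 2 ^ a) - 1
        = ((M' * 2 ^ K + (2 ^ (a + b) + (2 ^ a - 1)) : Nat) : Int) := by
      rw [hm', Nat.cast_add, Nat.cast_mul, Nat.cast_add, Nat.cast_sub Nat.one_le_two_pow]
      push_cast
      have hsplit : (2:Int) ^ K = 2 ^ (a + b) + (2 ^ b) * 2 ^ a := by
        rw [hK, pow_succ, ← pow_add, Nat.add_comm b a]
        ring
      nlinarith [hsplit]
    have hkr : -(M * 2 ^ K + 2 ^ (a + b)) - 1
        = ((M' * 2 ^ K + (2 ^ (a + b) - 1) : Nat) : Int) := by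
      rw [hm', Nat.cast_add, Nat.cast_mul, Nat.cast_sub Nat.one_le_two_pow]
      push_cast
      have hsplit : (2:Int) ^ K = 2 ^ (a + b) + 2 ^ (a + b) := by
        rw [hK, pow_succ]; ring
      nlinarith [hsplit]
    rw [hky, hkr, Int.toNat_natCast, Int.toNat_natCast]
    have hlt1 : (2:Nat) ^ (a + b) + (2 ^ a - 1) < 2 ^ K := by
      have h3 : (2:Nat) ^ a ≤ 2 ^ (a + b) := Nat.pow_le_pow_right (by norm_num) (by omega)
      have h4 : (2:Nat) ^ K = 2 ^ (a + b) + 2 ^ (a + b) := by rw [hK, pow_succ]; omega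
      omega
    have hlt2 : (2:Nat) ^ (a + b) - 1 < 2 ^ K := by omega
    rw [pvNat_lxor_split M' M' _ _ K hlt1 hlt2, Nat.xor_self, Nat.zero_mul, Nat.zero_add]
    -- (2^(a+b) + (2^a - 1)) ^^^ (2^(a+b) - 1) = 2^K - 2^a
    have hx : ((2:Nat) ^ (a + b) + (2 ^ a - 1)) ^^^ (2 ^ (a + b) - 1)
        = 2 ^ K - 2 ^ a := by
      have hs1 : (2:Nat) ^ a - 1 < 2 ^ (a + b) := by
        have : (2:Nat) ^ a ≤ 2 ^ (a + b) := Nat.pow_le_pow_right (by norm_num) (by omega)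
        have := Nat.two_pow_pos a
        omega
      have := pvNat_lxor_split 1 0 (2 ^ a - 1) (2 ^ (a + b) - 1) (a + b) hs1 (by omega)
      simp only [Nat.one_mul, Nat.zero_mul, Nat.zero_add] at this
      rw [this]
      have hmm := pvNat_mask_xor_mask a b
      rw [show (1:Nat) ^^^ 0 = 1 by decide, hmm, Nat.one_mul]
      have h5 : (2:Nat) ^ (a + b) = 2 ^ b * 2 ^ a := by rw [← pow_add, Nat.add_comm]
      have h6 : (2:Nat) ^ K = 2 ^ (a + b) + 2 ^ (a + b) := by rw [hK, pow_succ]; omega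
      have h7 : ((2:Nat) ^ b - 1) * 2 ^ a = 2 ^ (a + b) - 2 ^ a := by
        rw [Nat.sub_mul, Nat.one_mul, h5]
      have h8 : (2:Nat) ^ a ≤ 2 ^ (a + b) := Nat.pow_le_pow_right (by norm_num) (by omega)
      omega
    rw [hx, hIcast]

-- the combined (>> 2) // 2^a step
theorem pvShiftDiv (a b : Nat) (hb : 1 ≤ b) :
    PySem.Int.floordiv ((2 ^ (a + b + 1) - 2 ^ a : Int) >>> (2:Nat)) (2 ^ a) = 2 ^ (b - 1) - 1 := by
  set n : Int := 2 ^ (a + b + 1) - 2 ^ a with hn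
  have hpa := pow_pos (by norm_num : (0:Int) < 2) a
  have hn0 : 0 ≤ n := by
    have : (2:Int) ^ a ≤ 2 ^ (a + b + 1) := pow_le_pow_right₀ (by norm_num) (by omega)
    omega
  have h4 : n >>> (2:Nat) = n / 4 := by
    rw [Int.shiftRight_eq_div_pow]; norm_num
  rw [h4, PySem.Int.floordiv, Int.fdiv_eq_ediv_of_nonneg _ (by positivity : (0:Int) ≤ 2 ^ a),
    Int.ediv_ediv_of_nonneg (by norm_num : (0:Int) ≤ 4)]
  have hD : (4:Int) * 2 ^ a = 2 ^ (a + 2) := by rw [pow_add]; ring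
  have hdec : n = 3 * 2 ^ a + (2 ^ (b - 1) - 1) * 2 ^ (a + 2) := by
    have h1 : (2:Int) ^ (a + b + 1) = 2 ^ (b - 1) * 2 ^ (a + 2) := by
      rw [← pow_add]
      congr 1
      omega
    rw [hn, h1, pow_add]
    ring
  rw [hD, hdec, Int.add_mul_ediv_right _ _ (by positivity : (2:Int) ^ (a + 2) ≠ 0)]
  have h30 : (0:Int) ≤ 3 * 2 ^ a := by positivity
  have h3lt : (3:Int) * 2 ^ a < 2 ^ (a + 2) := by
    rw [pow_add]
    nlinarith [pow_pos (by norm_num : (0:Int) < 2) a]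
  rw [Int.ediv_eq_zero_of_lt h30 h3lt]
  ring

-- parity / shift helpers
theorem pvBand1 (x : Int) : PySem.Int.band x 1 = x % 2 := by
  rw [PySem.Int.band_one, PySem.Int.mod_eq_emod_of_pos (by norm_num)]

theorem pvShiftRight_one (x : Int) : x >>> (1 : Nat) = x / 2 := by
  rw [Int.shiftRight_eq_div_pow]
  norm_num

theorem pvShiftRight_succ (x : Int) (k : Nat) : x >>> (k + 1) = (x >>> k) >>> (1 : Nat) := by
  simp only [Int.shiftRight_eq_div_pow]
  rw [Int.ediv_ediv_of_nonneg (by positivity : (0:Int) ≤ ((2 ^ k : Nat) : Int))]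
  push_cast
  rw [pow_succ]

theorem pvPowMono {i j : Nat} (h : i ≤ j) : (2:Int) ^ i ≤ 2 ^ j := by
  exact_mod_cast Nat.pow_le_pow_right (by norm_num) h

-- loop layer: A's merged loop, phase 2 (counting zeros) then phase 1 (counting ones)
theorem pvALoop2 (num : Int) (b : Nat) : ∀ (f : Nat) (c1 c0 w : Int), 0 ≤ c1 → 1 ≤ c0 →
    w % 2 = 1 → num >>> (c1 + c0).toNat = w * 2 ^ b → b ≤ f →
    lowerALoop num f c1 c0 (PySem.Int.band (num >>> (c1 + c0).toNat) 1) = (c1, c0 + b) := by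
  induction b with
  | zero =>
    intro f c1 c0 w h1 h0 hw hsh _
    have hbit : PySem.Int.band (num >>> (c1 + c0).toNat) 1 = 1 := by
      rw [hsh, pvBand1]
      have h : w * (2:Int) ^ 0 = w := by norm_num
      rw [h, hw]
    rw [hbit]
    cases f with
    | zero => simp [lowerALoop]
    | succ f' =>
      simp only [lowerALoop]
      rw [if_neg (by omega)]
      simp
  | succ b ih =>
    intro f c1 c0 w h1 h0 hw hsh hf
    have hbit : PySem.Int.band (num >>> (c1 + c0).toNat) 1 = 0 := by
      rw [hsh, pvBand1]
      have h : w * (2:Int) ^ (b + 1) = 2 * (w * 2 ^ b) := by ring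
      rw [h]; omega
    cases f with
    | zero => omega
    | succ f' =>
      rw [hbit]
      simp only [lowerALoop]
      norm_num
      have hk : (c1 + (c0 + 1)).toNat = (c1 + c0).toNat + 1 := by omega
      have hsh' : num >>> (c1 + (c0 + 1)).toNat = w * 2 ^ b := by
        rw [hk, pvShiftRight_succ, hsh, pvShiftRight_one]
        have h : w * (2:Int) ^ (b + 1) = 2 * (w * 2 ^ b) := by ring
        rw [h]; omega
      have := ih f' c1 (c0 + 1) w h1 (by omega) hw hsh' (by omega)
      rw [this]
      congr 1
      push_cast
      ring

theorem pvALoop1 (num : Int) (a : Nat) : ∀ (f : Nat) (c1 v w : Int) (b : Nat), 0 ≤ c1 →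
    v % 2 = 0 → w % 2 = 1 → v = w * 2 ^ b → 1 ≤ b →
    num >>> c1.toNat = v * 2 ^ a + (2 ^ a - 1) → a + b ≤ f →
    lowerALoop num f c1 0 (PySem.Int.band (num >>> c1.toNat) 1) = (c1 + a, (b : Int)) := by
  induction a with
  | zero =>
    intro f c1 v w b h1 hv hw hvw hb hsh hf
    obtain ⟨b', rfl⟩ : ∃ b', b = b' + 1 := ⟨b - 1, by omega⟩
    have hbit : PySem.Int.band (num >>> c1.toNat) 1 = 0 := by
      rw [hsh, pvBand1]
      have h : v * (2:Int) ^ 0 + (2 ^ 0 - 1) = v := by norm_num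
      rw [h, hv]
    cases f with
    | zero => omega
    | succ f' =>
      rw [hbit]
      simp only [lowerALoop]
      norm_num
      have hk : (c1 + 1).toNat = c1.toNat + 1 := by omega
      have hsh' : num >>> (c1 + 1).toNat = w * 2 ^ b' := by
        rw [hk, pvShiftRight_succ, hsh, pvShiftRight_one]
        have h : v * (2:Int) ^ 0 + ((2:Int) ^ 0 - 1) = v := by norm_num
        rw [h, hvw]
        have h2 : w * (2:Int) ^ (b' + 1) = 2 * (w * 2 ^ b') := by rw [pow_succ]; ring
        rw [h2]; omega
      have h3 := pvALoop2 num b' f' c1 1 w h1 (by omega) hw hsh' (by omega)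
      rw [h3]
      congr 1 <;> omega
  | succ a ih =>
    intro f c1 v w b h1 hv hw hvw hb hsh hf
    have hbit : PySem.Int.band (num >>> c1.toNat) 1 = 1 := by
      rw [hsh, pvBand1]
      have h : v * (2:Int) ^ (a + 1) + ((2:Int) ^ (a + 1) - 1)
          = 2 * (v * 2 ^ a + 2 ^ a) - 1 := by ring
      rw [h]; omega
    cases f with
    | zero => omega
    | succ f' =>
      rw [hbit]
      simp only [lowerALoop]
      norm_num
      have hk : (c1 + 1 + 0).toNat = c1.toNat + 1 := by omega
      have hsh' : num >>> (c1 + 1 + 0).toNat = v * 2 ^ a + (2 ^ a - 1) := by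
        rw [hk, pvShiftRight_succ, hsh, pvShiftRight_one]
        have h : v * (2:Int) ^ (a + 1) + ((2:Int) ^ (a + 1) - 1)
            = 2 * (v * 2 ^ a + (2 ^ a - 1)) + 1 := by ring
        rw [h]; omega
      have := ih f' (c1 + 1) v w b (by omega) hv hw hvw hb (by simpa using hsh') (by omega)
      simp only [add_zero] at this ⊢
      rw [this]
      congr 1
      push_cast
      ring

-- arithmetic layer: odd-part factorisation
theorem pvOddFactorNat (n : Nat) (hn : n ≠ 0) : ∃ k u, n = 2 ^ k * u ∧ u % 2 = 1 := by
  revert hn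
  induction n using Nat.strong_induction_on with
  | _ n ih =>
    intro hn
    rcases Nat.even_or_odd n with ⟨c, hc⟩ | ⟨c, hc⟩
    · obtain ⟨k, u, h, hu⟩ := ih c (by omega) (by omega)
      exact ⟨k + 1, u, by rw [hc, h, pow_succ]; ring, hu⟩
    · exact ⟨0, n, by simp, by omega⟩

theorem pvOddFactorInt (t : Int) (ht : t ≠ 0) :
    ∃ (k : Nat) (u : Int), t = u * 2 ^ k ∧ u % 2 = 1 := by
  obtain ⟨k, u0, h, hu⟩ := pvOddFactorNat t.natAbs (by simpa using ht)
  rcases Int.natAbs_eq t with h2 | h2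
  · exact ⟨k, (u0 : Int), by rw [h2, h]; push_cast; ring, by omega⟩
  · exact ⟨k, -(u0 : Int), by rw [h2, h]; push_cast; ring, by omega⟩

-- ===== VERDICT (by name: the statement is the Claim_ definition above) =====
theorem lower_bin_same_ones_spec : Claim_equal_lower_bin_same_ones := by
  unfold Claim_equal_lower_bin_same_ones
  intro num hDom hPre
  unfold Spec_lower_bin_same_ones
  obtain ⟨hne, hall⟩ := hPre
  have hDom' : -2147483648 ≤ num ∧ num ≤ 2147483648 := by
    simpa [Dom_lower_bin_same_ones, pvDomInt] using hDom
  -- decomposition: num = v * 2^a + (2^a - 1) with v even, v = w * 2^b with w odd, b ≥ 1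
  obtain ⟨a, u, hu, huodd⟩ := pvOddFactorInt (num + 1) (by omega)
  have hveven : (u - 1) % 2 = 0 := by omega
  set v : Int := u - 1 with hv
  have hnum : num = v * 2 ^ a + (2 ^ a - 1) := by
    have h1 : num = (v + 1) * 2 ^ a - 1 := by
      have : u = v + 1 := by omega
      rw [this] at hu; omega
    calc num = (v + 1) * 2 ^ a - 1 := h1
      _ = v * 2 ^ a + (2 ^ a - 1) := by ring
  have hpa_pos : (0:Int) < 2 ^ a := pow_pos (by norm_num) a
  -- bound on a
  have hA2 : (2:Int) ^ a ≤ 2 ^ 31 + 1 := by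
    rcases (by omega : 1 ≤ u ∨ u ≤ -1) with h | h
    · have h2 : 1 * 2 ^ a ≤ u * 2 ^ a := by
        exact mul_le_mul_of_nonneg_right h (by positivity)
      have h3 : (2:Int) ^ 31 = 2147483648 := by norm_num
      nlinarith
    · have h2 : u * 2 ^ a ≤ (-1) * 2 ^ a := by
        exact mul_le_mul_of_nonneg_right h (by positivity)
      have h3 : (2:Int) ^ 31 = 2147483648 := by norm_num
      nlinarith
  have ha31 : a ≤ 31 := by
    by_contra hcon
    have h2 : (2:Int) ^ 32 ≤ 2 ^ a := pvPowMono (by omega)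
    have h3 : (2:Int) ^ 32 = 4294967296 := by norm_num
    have h4 : (2:Int) ^ 31 = 2147483648 := by norm_num
    linarith
  have hv0 : v ≠ 0 := by
    intro h0
    exact hall a (by omega) (by rw [hnum, h0]; ring)
  obtain ⟨b, w, hw, hwodd⟩ := pvOddFactorInt v hv0
  have hb1 : 1 ≤ b := by
    rcases Nat.eq_zero_or_pos b with hb0 | hb1'
    · exfalso; rw [hb0] at hw; simp at hw; omega
    · exact hb1'
  -- bound on a + b
  have hab : a + b ≤ 98 := by
    by_contra hcon
    have hvw2 : v * 2 ^ a = w * 2 ^ (a + b) := by rw [hw, pow_add]; ring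
    have h5 : (2:Int) ^ 99 ≤ 2 ^ (a + b) := pvPowMono (by omega)
    have h6 : (2:Int) ^ 99 = 633825300114114700748351602688 := by norm_num
    rcases (by omega : 1 ≤ w ∨ w ≤ -1) with h | h
    · have h2 : 1 * 2 ^ (a + b) ≤ w * 2 ^ (a + b) := by
        exact mul_le_mul_of_nonneg_right h (by positivity)
      nlinarith
    · have h2 : w * 2 ^ (a + b) ≤ (-1) * 2 ^ (a + b) := by
        exact mul_le_mul_of_nonneg_right h (by positivity)
      nlinarith
  -- run A's loop
  have hnum0 : num >>> ((0:Int)).toNat = v * 2 ^ a + (2 ^ a - 1) := by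
    rw [Int.toNat_zero, Int.shiftRight_zero]
    exact hnum
  have hccA : lowerALoop num 100 0 0 (PySem.Int.band num 1) = ((a : Int), (b : Int)) := by
    have h := pvALoop1 num a 100 0 v w b le_rfl hveven hwodd hw hb1 hnum0 (by omega)
    rw [Int.toNat_zero, Int.shiftRight_zero] at h
    simpa using h
  -- unfold A
  simp only [lower_bin_same_ones, hccA]
  -- normalise shifts and toNat arithmetic
  have ht1 : ((a : Int) + (b : Int)).toNat = a + b := by omega
  have ht2 : ((a : Int) + 1).toNat = a + 1 := by omega
  have ht3 : (((a : Int) + (b : Int)) - ((a : Int) + 1)).toNat = b - 1 := by omega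
  have hInot : Int.not 0 = (-1 : Int) := by decide
  simp only [ht1, ht2, ht3, hInot, Int.shiftLeft_eq, one_mul, neg_one_mul]
  -- structured form of num
  obtain ⟨m, hm⟩ : ∃ m : Int, w = 2 * m + 1 := ⟨(w - 1) / 2, by omega⟩
  have hpowS : (2:Int) ^ (a + b + 1) = 2 * 2 ^ (a + b) := by rw [pow_succ]; ring
  have hpowA : (2:Int) ^ (a + b) = 2 ^ a * 2 ^ b := pow_add 2 a b
  have hnum2 : num = m * 2 ^ (a + b + 1) + 2 ^ (a + b) + (2 ^ a - 1) := by
    have hpb : (2:Int) ^ b = 2 ^ (b - 1) * 2 := by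
      rw [← pow_succ]; congr 1; omega
    rw [hnum, hw, hm, hpowS, hpowA, hpb]; ring
  have hr0 : (0:Int) ≤ 2 ^ a - 1 := by omega
  have hrlt : (2:Int) ^ a - 1 < 2 ^ (a + b) := by
    have := pvPowMono (show a ≤ a + b by omega)
    omega
  -- the shifted ones mask
  have hs0 : (0:Int) ≤ ((2:Int) ^ (a + 1) - 1) * 2 ^ (b - 1) := by
    have h1 : (0:Int) < 2 ^ (a + 1) := pow_pos (by norm_num) _
    have h2 : (0:Int) < 2 ^ (b - 1) := pow_pos (by norm_num) _
    nlinarith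
  have hslt : ((2:Int) ^ (a + 1) - 1) * 2 ^ (b - 1) < 2 ^ (a + b) := by
    have h1 : (0:Int) < 2 ^ (b - 1) := pow_pos (by norm_num) _
    have h2 : ((2:Int) ^ (a + 1) - 1) * 2 ^ (b - 1) < 2 ^ (a + 1) * 2 ^ (b - 1) := by
      nlinarith
    have h3 : (2:Int) ^ (a + 1) * 2 ^ (b - 1) = 2 ^ (a + b) := by
      rw [← pow_add]; congr 1; omega
    linarith
  -- compute A's result
  have hflip : PySem.Int.bxor (2 ^ (a + b)) num = m * 2 ^ (a + b + 1) + (2 ^ a - 1) := by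
    rw [hnum2]; exact pvBxor_bit m (2 ^ a - 1) (a + b) hr0 hrlt
  have hsplit : m * (2:Int) ^ (a + b + 1) + (2 ^ a - 1)
      = (2 * m) * 2 ^ (a + b) + (2 ^ a - 1) := by rw [hpowS]; ring
  have hclear : PySem.Int.band (m * 2 ^ (a + b + 1) + (2 ^ a - 1)) (-(2 ^ (a + b)))
      = (2 * m) * 2 ^ (a + b) := by
    rw [hsplit]; exact pvBand_low (2 * m) (2 ^ a - 1) (a + b) hr0 hrlt
  have horA : PySem.Int.bor ((2 * m) * 2 ^ (a + b)) ((2 ^ (a + 1) - 1) * 2 ^ (b - 1))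
      = (2 * m) * 2 ^ (a + b) + (2 ^ (a + 1) - 1) * 2 ^ (b - 1) :=
    pvBor_disjoint (2 * m) _ (a + b) hs0 hslt
  rw [hflip, hclear, horA]
  -- compute B's result
  set M : Int := -m - 1 with hM
  have hyval : Int.not num = M * 2 ^ (a + b + 1) + (2 ^ b - 1) * 2 ^ a := by
    rw [pvNotEq, hnum2, hM, hpowS, hpowA]
    ring
  have hzform : M * 2 ^ (a + b + 1) + (2 ^ b - 1) * 2 ^ a
      = (M * 2 ^ (b + 1) + 2 ^ b - 1) * 2 ^ a := by
    rw [show (2:Int) ^ (a + b + 1) = 2 ^ (b + 1) * 2 ^ a by rw [← pow_add]; congr 1; omega]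
    ring
  have hzodd : (M * 2 ^ (b + 1) + 2 ^ b - 1) % 2 = 1 := by
    have h2 : (2:Int) ^ b = 2 * 2 ^ (b - 1) := by
      rw [← pow_succ']; congr 1; omega
    have h1 : M * 2 ^ (b + 1) + 2 ^ b - 1 = 2 * (M * 2 ^ b + 2 ^ (b - 1)) - 1 := by
      rw [pow_succ]
      linear_combination h2
    rw [h1]
    omega
  have hcval : PySem.Int.band (Int.not num) (-(Int.not num)) = 2 ^ a := by
    rw [hyval, hzform]
    exact pvLowBit (M * 2 ^ (b + 1) + 2 ^ b - 1) a hzodd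
  have hrval : Int.not num + 2 ^ a = M * 2 ^ (a + b + 1) + 2 ^ (a + b) := by
    rw [hyval, hpowA]
    have h2 : ((2:Int) ^ b - 1) * 2 ^ a + 2 ^ a = 2 ^ b * 2 ^ a := by ring
    linarith [h2]
  have hxorval : PySem.Int.bxor (Int.not num) (M * 2 ^ (a + b + 1) + 2 ^ (a + b))
      = 2 ^ (a + b + 1) - 2 ^ a := by
    rw [hyval]
    exact pvBxorYR M a b hb1
  have hdivval : PySem.Int.floordiv ((2 ^ (a + b + 1) - 2 ^ a : Int) >>> (2:Nat)) (2 ^ a)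
      = 2 ^ (b - 1) - 1 := pvShiftDiv a b hb1
  have hq0 : (0:Int) ≤ 2 ^ (b - 1) - 1 := by
    have := pow_pos (by norm_num : (0:Int) < 2) (b - 1)
    omega
  have hqlt : (2:Int) ^ (b - 1) - 1 < 2 ^ (a + b) := by
    have := pvPowMono (show b - 1 ≤ a + b by omega)
    omega
  have hrform : M * (2:Int) ^ (a + b + 1) + 2 ^ (a + b) = (2 * M + 1) * 2 ^ (a + b) := by
    rw [hpowS]; ring
  have horB : PySem.Int.bor (M * 2 ^ (a + b + 1) + 2 ^ (a + b)) (2 ^ (b - 1) - 1)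
      = (2 * M + 1) * 2 ^ (a + b) + (2 ^ (b - 1) - 1) := by
    rw [hrform]
    exact pvBor_disjoint (2 * M + 1) _ (a + b) hq0 hqlt
  show _ = lower_bin_same_ones_alt num
  simp only [lower_bin_same_ones_alt]
  rw [hcval, hrval, hxorval, hdivval, horB, pvNotEq, hM]
  have hpb1 : (2:Int) ^ (a + 1) * 2 ^ (b - 1) = 2 ^ (a + b) := by
    rw [← pow_add]; congr 1; omega
  linear_combination hpb1
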